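-- pv_equiv track=rewrite | github.com/andermirik/Jenkins-Api | NLP/NLU/speech_to_text.py | post_process_numbers
-- ===== SOURCE A (Python) =====
-- def post_process_numbers(text):
--     words = text.split()
--     result = []
--     i = 0
--
--     while i < len(words):
--         word = words[i]
--
--         if word.isdigit():
--             number = int(word)
--             i += 1
--             while i < len(words) and words[i].isdigit():
--                 number += int(words[i])
--                 i += 1
--             result.append(str(number))
--         else:
--             result.append(word)
--             i += 1
--
--     return " ".join(result)
-- ===== SOURCE B (Python) =====
-- def post_process_numbers(text):
--     pieces = []
--     pending = None
--     for w in text.split():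
--         if w.isdigit():
--             pending = (0 if pending is None else pending) + int(w)
--         else:
--             if pending is not None:
--                 pieces.append(str(pending))
--                 pending = None
--             pieces.append(w)
--     if pending is not None:
--         pieces.append(str(pending))
--     return " ".join(pieces)
-- ===== Notes on version B (the rewrite author's own statement) =====
-- stated objective: simpler
-- what changed: Replaces the manual index pointer with a nested inner while-loop by a single flat pass that folds a running sum accumulator over the words, flushing it when a non-digit word (or the end) is reached.
import Mathlib
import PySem

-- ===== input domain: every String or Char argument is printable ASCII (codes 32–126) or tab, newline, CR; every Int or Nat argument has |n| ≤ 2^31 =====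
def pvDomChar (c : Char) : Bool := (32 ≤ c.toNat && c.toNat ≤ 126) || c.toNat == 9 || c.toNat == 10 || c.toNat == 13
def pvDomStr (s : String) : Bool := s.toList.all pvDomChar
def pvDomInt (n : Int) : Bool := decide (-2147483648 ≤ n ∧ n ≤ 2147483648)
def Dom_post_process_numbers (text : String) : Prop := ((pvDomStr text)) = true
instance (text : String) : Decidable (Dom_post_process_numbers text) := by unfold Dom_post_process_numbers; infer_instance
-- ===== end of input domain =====

-- B replaces A's index pointer + nested inner while-loop by a single flat pass that
-- folds a running sum accumulator over the words, flushing it at each non-digit word (simpler).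

-- int(w), only evaluated on words where w.isdigit() holds, so ofStr? is always `some` there
def pvInt (w : String) : Int := (PySem.Int.ofStr? w).getD 0

-- ===== PORT A =====
-- inner while: consume consecutive digit words, accumulating the sum
def pvInnerA (n : Int) : List String → Int × List String
  | [] => (n, [])
  | w :: ws => if PySem.Str.strIsdigit w then pvInnerA (n + pvInt w) ws else (n, w :: ws)

theorem pvInnerA_len : ∀ (ws : List String) (n : Int), (pvInnerA n ws).2.length ≤ ws.length := by
  intro ws
  induction ws with
  | nil => intro n; simp [pvInnerA]
  | cons w ws ih =>
    intro n
    by_cases h : PySem.Chars.strIsdigit w.toList = true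
    · simpa [pvInnerA, PySem.Str.strIsdigit, h] using Nat.le_succ_of_le (ih (n + pvInt w))
    · simp [pvInnerA, PySem.Str.strIsdigit, h]

-- outer while over the word list
def pvLoopA : List String → List String
  | [] => []
  | w :: ws =>
    if PySem.Str.strIsdigit w then
      let p := pvInnerA (pvInt w) ws
      PySem.Int.toStr p.1 :: pvLoopA p.2
    else w :: pvLoopA ws
termination_by ws => ws.length
decreasing_by
  · exact Nat.lt_succ_of_le (pvInnerA_len ws (pvInt w))
  · simp

def post_process_numbers (text : String) : String :=
  PySem.Str.join " " (pvLoopA (PySem.Str.split₀ text))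

-- ===== PORT B =====
-- one step of B's for-loop: state = (pieces so far, pending sum or none)
def pvStepB (st : List String × Option Int) (w : String) : List String × Option Int :=
  if PySem.Str.strIsdigit w then
    (st.1, some ((match st.2 with | none => 0 | some n => n) + pvInt w))
  else
    match st.2 with
    | some n => (st.1 ++ [PySem.Int.toStr n, w], none)
    | none => (st.1 ++ [w], none)

-- final flush of a leftover pending sum
def pvFinishB (st : List String × Option Int) : List String :=
  match st.2 with
  | some n => st.1 ++ [PySem.Int.toStr n]
  | none => st.1

def post_process_numbers_alt (text : String) : String :=
  PySem.Str.join " " (pvFinishB ((PySem.Str.split₀ text).foldl pvStepB ([], none)))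

-- ===== PRECONDITION & SPEC =====
def Spec_post_process_numbers (text : String) (out : String) : Prop := out = post_process_numbers_alt text
instance (text : String) (out : String) : Decidable (Spec_post_process_numbers text out) := by unfold Spec_post_process_numbers; infer_instance

-- ===== CLAIM (what is proved, stated in full; the proofs are below) =====
def Claim_equal_post_process_numbers : Prop := ∀ (text : String), Dom_post_process_numbers text → Spec_post_process_numbers text (post_process_numbers text)

-- ===== LEMMAS AND PROOFS =====

-- simultaneous loop invariant for B's fold, by strong induction on the word list length:
-- with no pending sum the fold appends exactly pvLoopA ws; with pending n it appends the
-- summed run's string followed by pvLoopA of the rest.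
theorem pvFold_inv : ∀ (k : Nat) (ws : List String), ws.length ≤ k →
    (∀ pieces : List String,
      pvFinishB (ws.foldl pvStepB (pieces, none)) = pieces ++ pvLoopA ws) ∧
    (∀ (n : Int) (pieces : List String),
      pvFinishB (ws.foldl pvStepB (pieces, some n)) =
        pieces ++ (PySem.Int.toStr (pvInnerA n ws).1 :: pvLoopA (pvInnerA n ws).2)) := by
  intro k
  induction k with
  | zero =>
    intro ws h
    have hw : ws = [] := List.eq_nil_of_length_eq_zero (Nat.le_zero.mp h)
    subst hw
    constructor
    · intro pieces; simp [pvFinishB, pvLoopA]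
    · intro n pieces; simp [pvFinishB, pvInnerA, pvLoopA]
  | succ k ih =>
    intro ws h
    match ws with
    | [] =>
      constructor
      · intro pieces; simp [pvFinishB, pvLoopA]
      · intro n pieces; simp [pvFinishB, pvInnerA, pvLoopA]
    | w :: ws =>
      have hlen : ws.length ≤ k := Nat.lt_succ_iff.mp h
      constructor
      · intro pieces
        by_cases hd : PySem.Chars.strIsdigit w.toList = true
        · have := (ih ws hlen).2 (pvInt w) pieces
          simp only [List.foldl_cons, pvStepB, PySem.Str.strIsdigit, hd, if_pos] at this ⊢
          simpa [pvLoopA, PySem.Str.strIsdigit, hd] using this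
        · have := (ih ws hlen).1 (pieces ++ [w])
          simp only [List.foldl_cons, pvStepB, PySem.Str.strIsdigit, hd] at this ⊢
          simp [this, pvLoopA, PySem.Str.strIsdigit, hd]
      · intro n pieces
        by_cases hd : PySem.Chars.strIsdigit w.toList = true
        · have := (ih ws hlen).2 (n + pvInt w) pieces
          simp only [List.foldl_cons, pvStepB, PySem.Str.strIsdigit, hd, if_pos] at this ⊢
          simpa [pvInnerA, PySem.Str.strIsdigit, hd] using this
        · have := (ih ws hlen).1 (pieces ++ [PySem.Int.toStr n, w])
          simp only [List.foldl_cons, pvStepB, PySem.Str.strIsdigit, hd] at this ⊢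
          simp [this, pvInnerA, pvLoopA, PySem.Str.strIsdigit, hd]

-- ===== VERDICT (by name: the statement is the Claim_ definition above) =====
theorem post_process_numbers_spec : Claim_equal_post_process_numbers := by
  intro text _
  unfold Spec_post_process_numbers post_process_numbers post_process_numbers_alt
  have := (pvFold_inv (PySem.Str.split₀ text).length (PySem.Str.split₀ text) le_rfl).1 []
  rw [this]
  simp
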